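-- pv_equiv track=rewrite | github.com/BartlomiejSzczukiewicz/homework | MOCKTEST3/MOCK3-2/p7.py | f
-- ===== SOURCE A (Python) =====
-- def f(arr2D):
--     arr1 = []
--     temp = list(zip(*arr2D))
--     for element in temp:
--         arr1.append(sum(element))
--     for i in arr1:
--         if arr1.count(i) > 1:
--             return True
--     return False
-- ===== SOURCE B (Python) =====
-- def f(arr2D):
--     sums = [sum(col) for col in zip(*arr2D)]
--     sums.sort()
--     return any(a == b for a, b in zip(sums, sums[1:]))
-- ===== Notes on version B (the rewrite author's own statement) =====
-- stated objective: faster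
-- what changed: replaces A's per-element count-scan duplicate test over the column sums (quadratic in the number of columns) with a sort followed by one comparison of adjacent neighbours
import Mathlib
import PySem

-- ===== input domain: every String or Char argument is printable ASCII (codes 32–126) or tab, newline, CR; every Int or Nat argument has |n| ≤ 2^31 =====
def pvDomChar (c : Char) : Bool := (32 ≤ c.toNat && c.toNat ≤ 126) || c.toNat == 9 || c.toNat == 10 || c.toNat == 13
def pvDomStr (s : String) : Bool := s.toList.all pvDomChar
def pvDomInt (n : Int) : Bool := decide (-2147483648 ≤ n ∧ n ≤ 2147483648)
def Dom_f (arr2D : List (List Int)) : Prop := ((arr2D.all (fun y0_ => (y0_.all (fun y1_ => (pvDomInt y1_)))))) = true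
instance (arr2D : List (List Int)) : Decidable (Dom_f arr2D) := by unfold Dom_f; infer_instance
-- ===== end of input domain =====

-- B replaces A's per-element count-scan duplicate test over the column sums by
-- sort-then-compare-adjacent-neighbours (alternative decomposition).

-- ===== PORT A =====
-- zip(*rows): truncates to the shortest row; j < every row's length, so getD's
-- default 0 is never consulted (exact on all inputs).
def pyZipStar (rows : List (List Int)) : List (List Int) :=
  match rows with
  | [] => []
  | r :: rs =>
    let m := rs.foldl (fun m row => min m row.length) r.length
    (List.range m).map (fun j => (r :: rs).map (fun row => row.getD j 0))

def f (arr2D : List (List Int)) : Bool :=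
  let temp := pyZipStar arr2D
  let arr1 := temp.foldl (fun acc element => acc ++ [element.sum]) []
  arr1.any (fun i => decide (1 < arr1.count i))

-- ===== PORT B =====
def f_alt (arr2D : List (List Int)) : Bool :=
  let sums := (pyZipStar arr2D).map (fun col => col.sum)
  let s := PySem.List.sorted sums (fun x => x) false
  (s.zip s.tail).any (fun p => p.1 == p.2)

-- ===== PRECONDITION & SPEC =====
def Spec_f (arr2D : List (List Int)) (out : Bool) : Prop := out = f_alt arr2D
instance (arr2D : List (List Int)) (out : Bool) : Decidable (Spec_f arr2D out) := by unfold Spec_f; infer_instance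

-- ===== CLAIM (what is proved, stated in full; the proofs are below) =====
def Claim_equal_f : Prop := ∀ (arr2D : List (List Int)), Dom_f arr2D → Spec_f arr2D (f arr2D)

-- ===== LEMMAS AND PROOFS =====

-- A's duplicate scan is the negation of Nodup.
theorem any_count_eq_not_nodup (xs : List Int) :
    (xs.any (fun i => decide (1 < xs.count i)) = true) ↔ ¬ xs.Nodup := by
  rw [List.nodup_iff_count_le_one]
  simp only [List.any_eq_true, decide_eq_true_eq]
  constructor
  · rintro ⟨i, _, hc⟩ h
    exact absurd (h i) (by omega)
  · intro h
    push Not at h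
    obtain ⟨a, ha⟩ := h
    exact ⟨a, List.count_pos_iff.mp (by omega), by omega⟩

-- On a (≤)-sorted list, an equal adjacent pair exists iff the list has a duplicate.
theorem adj_eq_iff_not_nodup : ∀ (l : List Int), l.Pairwise (· ≤ ·) →
    (((l.zip l.tail).any (fun p => p.1 == p.2) = true) ↔ ¬ l.Nodup)
  | [], _ => by simp
  | [a], _ => by simp
  | a :: b :: u, h => by
    have hab : a ≤ b := (List.pairwise_cons.mp h).1 b (by simp)
    have hau : ∀ x ∈ u, a ≤ x := fun x hx => (List.pairwise_cons.mp h).1 x (by simp [hx])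
    have hbu : ∀ x ∈ u, b ≤ x := fun x hx =>
      (List.pairwise_cons.mp (List.pairwise_cons.mp h).2).1 x hx
    have ih := adj_eq_iff_not_nodup (b :: u) (List.pairwise_cons.mp h).2
    by_cases hab' : a = b
    · subst hab'
      simp [List.nodup_cons]
    · have hnotmem : a ∉ b :: u := by
        intro hm
        rcases List.mem_cons.mp hm with h1 | h2
        · exact hab' h1
        · exact hab' (le_antisymm hab (le_trans (hbu a h2) (le_of_eq rfl)))
      simp only [List.zip, List.tail, List.zipWith, List.any_cons]
      rw [List.nodup_cons]
      constructor
      · intro hor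
        rcases Bool.or_eq_true_iff.mp hor with h1 | h2
        · exact absurd (by simpa using h1) hab'
        · intro hn; exact (ih.mp h2) hn.2
      · intro hn
        apply Bool.or_eq_true_iff.mpr
        right
        apply ih.mpr
        intro hnu
        exact hn ⟨hnotmem, hnu⟩

theorem dup_detect_eq (xs : List Int) :
    xs.any (fun i => decide (1 < xs.count i))
      = ((PySem.List.sorted xs (fun x => x) false).zip
          (PySem.List.sorted xs (fun x => x) false).tail).any (fun p => p.1 == p.2) := by
  rw [Bool.eq_iff_iff]
  rw [any_count_eq_not_nodup,
    adj_eq_iff_not_nodup _ (PySem.List.sorted_pairwise xs (fun x => x))]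
  exact not_congr (PySem.List.sorted_perm xs (fun x => x) false).nodup_iff |>.symm

-- ===== VERDICT (by name: the statement is the Claim_ definition above) =====
theorem f_spec : Claim_equal_f := by
  intro arr2D _
  unfold Spec_f f f_alt
  simp only [PySem.List.foldl_append_singleton_eq_map, List.nil_append]
  exact dup_detect_eq _
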